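-- pv_equiv track=rewrite | github.com/edno2819/DashBoard | processing.py | To_negation
-- ===== SOURCE A (Python) =====
-- def To_negation(texto):# PARAR A ADIÇÃO DO NEG EM UM .
--     negacoes = ['não','not']
--     negacao_detectada = False
--     resultado = []
--     palavras = texto.split()
--     for p in palavras:
--         p = p.lower()
--         if negacao_detectada == True:
--             p = p + '_neg'
--         if p in negacoes:
--             negacao_detectada = True
--         resultado.append(p)
--     return (" ".join(resultado))
-- ===== SOURCE B (Python) =====
-- def To_negation(texto):
--     negacoes = ['não', 'not']
--     palavras = [w.lower() for w in texto.split()]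
--     i = next((j for j, w in enumerate(palavras) if w in negacoes), None)
--     if i is None:
--         return ' '.join(palavras)
--     return ' '.join(palavras[:i + 1] + [w + '_neg' for w in palavras[i + 1:]])
-- ===== Notes on version B (the rewrite author's own statement) =====
-- stated objective: alternative
-- what changed: B lowercases all words up front, locates the index of the first negation word, and builds the result from two slices (prefix unchanged, suffix mapped with '_neg'), instead of threading a boolean flag through a single accumulating loop.
import Mathlib
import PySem

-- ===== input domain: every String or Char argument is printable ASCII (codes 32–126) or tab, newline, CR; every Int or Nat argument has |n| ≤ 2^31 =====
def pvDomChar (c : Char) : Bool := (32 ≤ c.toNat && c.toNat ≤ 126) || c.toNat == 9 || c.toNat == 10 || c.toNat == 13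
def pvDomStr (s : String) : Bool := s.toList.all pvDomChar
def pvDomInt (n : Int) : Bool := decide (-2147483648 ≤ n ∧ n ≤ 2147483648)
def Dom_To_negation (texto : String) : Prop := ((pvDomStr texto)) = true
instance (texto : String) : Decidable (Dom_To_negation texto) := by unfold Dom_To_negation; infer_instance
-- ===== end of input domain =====

-- ===== PORT A =====
-- B locates the first negation word and transforms two slices; A threads a flag through one pass.
-- A-side helper: the loop body of A's for-loop (lowercase, suffix if flag set, update flag, append).
def pvStepA (st : Bool × List (List Char)) (p : List Char) : Bool × List (List Char) :=
  let p := PySem.Chars.lower p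
  let p := if st.1 then p ++ "_neg".toList else p
  let flag := if ["não".toList, "not".toList].contains p then true else st.1
  (flag, st.2 ++ [p])

def To_negation (texto : String) : String :=
  let palavras := PySem.Chars.split₀ texto.toList
  let r := palavras.foldl pvStepA (false, [])
  String.ofList (PySem.Chars.join " ".toList r.2)

-- ===== PORT B =====
def To_negation_alt (texto : String) : String :=
  let negacoes : List (List Char) := ["não".toList, "not".toList]
  let palavras := (PySem.Chars.split₀ texto.toList).map PySem.Chars.lower
  match palavras.findIdx? (fun w => negacoes.contains w) with
  | none => String.ofList (PySem.Chars.join " ".toList palavras)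
  | some i =>
      String.ofList (PySem.Chars.join " ".toList
        (palavras.take (i + 1) ++ (palavras.drop (i + 1)).map (· ++ "_neg".toList)))

-- ===== PRECONDITION & SPEC =====
def Spec_To_negation (texto : String) (out : String) : Prop := out = To_negation_alt texto
instance (texto : String) (out : String) : Decidable (Spec_To_negation texto out) := by unfold Spec_To_negation; infer_instance

-- ===== CLAIM (what is proved, stated in full; the proofs are below) =====
def Claim_equal_To_negation : Prop := ∀ (texto : String), Dom_To_negation texto → Spec_To_negation texto (To_negation texto)

-- ===== LEMMAS AND PROOFS =====

-- Once the flag is set, every remaining word is lowercased and suffixed; the flag stays set.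
theorem pvFoldA_true (ws : List (List Char)) (acc : List (List Char)) :
    ws.foldl pvStepA (true, acc)
      = (true, acc ++ ws.map (fun w => PySem.Chars.lower w ++ "_neg".toList)) := by
  induction ws generalizing acc with
  | nil => simp
  | cons w rest ih =>
      simp [List.foldl_cons, pvStepA, ih, List.append_assoc]

-- With the flag still unset, A's fold computes B's split-at-first-negation shape.
theorem pvFoldA_false (ws : List (List Char)) (acc : List (List Char)) :
    (ws.foldl pvStepA (false, acc)).2
      = acc ++
        (match (ws.map PySem.Chars.lower).findIdx?
            (fun w => (["não".toList, "not".toList] : List (List Char)).contains w) with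
         | none => ws.map PySem.Chars.lower
         | some i =>
             (ws.map PySem.Chars.lower).take (i + 1)
               ++ ((ws.map PySem.Chars.lower).drop (i + 1)).map (· ++ "_neg".toList)) := by
  induction ws generalizing acc with
  | nil => simp
  | cons w rest ih =>
      simp only [List.map_cons, List.findIdx?_cons]
      by_cases h : PySem.Chars.lower w = ['n','ã','o'] ∨ PySem.Chars.lower w = ['n','o','t']
      · rw [List.foldl_cons,
          show pvStepA (false, acc) w = (true, acc ++ [PySem.Chars.lower w]) by
            simp [pvStepA, h],
          pvFoldA_true]
        simp [h, List.map_map]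
      · rw [List.foldl_cons,
          show pvStepA (false, acc) w = (false, acc ++ [PySem.Chars.lower w]) by
            simp [pvStepA, h],
          ih]
        cases hf : (rest.map PySem.Chars.lower).findIdx?
            (fun w => (["não".toList, "not".toList] : List (List Char)).contains w) with
        | none => simp [h]
        | some i => simp [h, List.append_assoc, List.map_drop]

-- ===== VERDICT (by name: the statement is the Claim_ definition above) =====
theorem To_negation_spec : Claim_equal_To_negation := by
  intro texto _
  unfold Spec_To_negation To_negation To_negation_alt
  simp only []
  rw [pvFoldA_false]
  cases hf : ((PySem.Chars.split₀ texto.toList).map PySem.Chars.lower).findIdx?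
      (fun w => (["não".toList, "not".toList] : List (List Char)).contains w)
  · rfl
  · rfl
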